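-- pv_equiv track=rewrite | github.com/Raaydon/bio | 2021/q1.py | left_right_split
-- ===== SOURCE A (Python) =====
-- def left_right_split(potential_pat):
--     left = ''
--     right = ''
--     if len(potential_pat) % 2 == 0: # if there are an even number of characters
--
--         for i,char in enumerate(potential_pat):
--             if i + 1 <= len(potential_pat)/2:
--                 left += char
--             else:
--                 right += char
--
--     else: # if there are odd characters
--
--         for i,char in enumerate(potential_pat):
--             if i <= len(potential_pat)/2:
--                 left += char
--             else:
--                 right += char
--     return left, right
-- ===== SOURCE B (Python) =====
-- def left_right_split(potential_pat):
--     mid = (len(potential_pat) + 1) // 2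
--     return potential_pat[:mid], potential_pat[mid:]
-- ===== Notes on version B (the rewrite author's own statement) =====
-- stated objective: faster
-- what changed: Replaces the parity branch and the two character-by-character string-concatenation loops over enumerate with one closed-form split index mid=(n+1)//2 and two slices.
import Mathlib
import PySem

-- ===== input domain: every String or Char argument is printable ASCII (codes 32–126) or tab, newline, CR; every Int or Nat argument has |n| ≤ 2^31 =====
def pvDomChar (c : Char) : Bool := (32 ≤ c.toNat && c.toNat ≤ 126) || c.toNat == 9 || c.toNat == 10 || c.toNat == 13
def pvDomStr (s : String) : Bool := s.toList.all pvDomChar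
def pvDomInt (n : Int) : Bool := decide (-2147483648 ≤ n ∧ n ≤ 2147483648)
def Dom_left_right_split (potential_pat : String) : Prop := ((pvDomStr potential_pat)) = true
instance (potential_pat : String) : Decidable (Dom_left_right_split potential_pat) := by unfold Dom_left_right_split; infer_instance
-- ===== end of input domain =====

-- B replaces A's parity branch and two char-by-char accumulation loops with one
-- closed-form split index mid = (len+1)//2 and two slices (objective: simpler).

-- ===== PORT A =====
def left_right_split (potential_pat : String) : String × String :=
  let n : Int := (potential_pat.toList.length : Int)
  if PySem.Int.mod n 2 == 0 then
    -- even branch: Python's `i + 1 <= len/2` uses true division; n even, so it is exact: i+1 ≤ n/2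
    (PySem.List.enumerate potential_pat.toList).foldl
      (fun (acc : String × String) iv =>
        if iv.1 + 1 ≤ PySem.Int.floordiv n 2 then (acc.1.push iv.2, acc.2)
        else (acc.1, acc.2.push iv.2))
      ("", "")
  else
    -- odd branch: Python's `i <= len/2` with true division; for an integer i this is exactly 2*i ≤ n
    (PySem.List.enumerate potential_pat.toList).foldl
      (fun (acc : String × String) iv =>
        if 2 * iv.1 ≤ n then (acc.1.push iv.2, acc.2)
        else (acc.1, acc.2.push iv.2))
      ("", "")

-- ===== PORT B =====
def left_right_split_alt (potential_pat : String) : String × String :=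
  let mid : Int := PySem.Int.floordiv ((potential_pat.toList.length : Int) + 1) 2
  (PySem.Str.slice potential_pat none (some mid), PySem.Str.slice potential_pat (some mid) none)

-- ===== PRECONDITION & SPEC =====
def Spec_left_right_split (potential_pat : String) (out : String × String) : Prop := out = left_right_split_alt potential_pat
instance (potential_pat : String) (out : String × String) : Decidable (Spec_left_right_split potential_pat out) := by unfold Spec_left_right_split; infer_instance

-- ===== CLAIM (what is proved, stated in full; the proofs are below) =====
def Claim_equal_left_right_split : Prop := ∀ (potential_pat : String), Dom_left_right_split potential_pat → Spec_left_right_split potential_pat (left_right_split potential_pat)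

-- ===== LEMMAS AND PROOFS =====

-- the enumerate-fold with a threshold test `index < mid` splits the list at `mid`
theorem pv_fold_split (f : String × String → Int × Char → String × String) (mid : Int)
    (hf : ∀ (acc : String × String) (i : Int) (c : Char),
      f acc (i, c) = if i < mid then (acc.1.push c, acc.2) else (acc.1, acc.2.push c)) :
    ∀ (l : List Char) (s : Int) (aL aR : String),
      (PySem.List.enumerate l s).foldl f (aL, aR)
        = (aL ++ String.ofList (l.take (mid - s).toNat),
           aR ++ String.ofList (l.drop (mid - s).toNat)) := by
  intro l
  induction l with
  | nil => intro s aL aR; simp [PySem.List.enumerate_nil]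
  | cons c l ih =>
    intro s aL aR
    rw [PySem.List.enumerate_cons, List.foldl_cons, hf]
    by_cases h : s < mid
    · rw [if_pos h, ih]
      have hk : (mid - s).toNat = (mid - (s + 1)).toNat + 1 := by omega
      rw [hk]
      refine Prod.ext ?_ (by simp)
      apply String.toList_inj.mp
      simp
    · rw [if_neg h, ih]
      have h0 : (mid - s).toNat = 0 := by omega
      have h1 : (mid - (s + 1)).toNat = 0 := by omega
      rw [h0, h1]
      refine Prod.ext (by simp) ?_
      apply String.toList_inj.mp
      simp

-- B's two slices are take/drop of the character list
theorem pv_slice_to (s : String) (k : Nat) :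
    PySem.Str.slice s none (some (k : Int)) = String.ofList (s.toList.take k) := by
  simp [PySem.Str.slice, PySem.List.slice_to s.toList (by positivity : (0:Int) ≤ (k : Int))]

theorem pv_slice_from (s : String) (k : Nat) :
    PySem.Str.slice s (some (k : Int)) none = String.ofList (s.toList.drop k) := by
  simp [PySem.Str.slice, PySem.List.slice_from s.toList (by positivity : (0:Int) ≤ (k : Int))]

-- ===== VERDICT (by name: the statement is the Claim_ definition above) =====
theorem left_right_split_spec : Claim_equal_left_right_split := by
  intro s _
  unfold Spec_left_right_split left_right_split left_right_split_alt
  have hmid : PySem.Int.floordiv ((s.toList.length : Int) + 1) 2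
      = (((s.toList.length + 1) / 2 : Nat) : Int) := by
    have h := PySem.Int.floordiv_natCast (s.toList.length + 1) 2
    push_cast at h ⊢
    exact h
  simp only [hmid, pv_slice_to, pv_slice_from]
  have hd : PySem.Int.floordiv ((s.toList.length : Int)) 2 = ((s.toList.length / 2 : Nat) : Int) := by
    exact_mod_cast PySem.Int.floordiv_natCast s.toList.length 2
  by_cases hpar : s.toList.length % 2 = 0
  · rw [if_pos (by
      rw [show PySem.Int.mod (s.toList.length : Int) 2 = ((s.toList.length % 2 : Nat) : Int) from
        PySem.Int.mod_natCast s.toList.length 2, hpar]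
      simp)]
    rw [pv_fold_split _ (((s.toList.length + 1) / 2 : Nat) : Int)
      (by
        intro acc i c
        have hcond : (i + 1 ≤ PySem.Int.floordiv (s.toList.length : Int) 2)
            ↔ (i < (((s.toList.length + 1) / 2 : Nat) : Int)) := by
          rw [hd]; omega
        simp only [hcond]) s.toList 0 "" ""]
    simp
    constructor <;> congr 2
  · rw [if_neg (by
      rw [show PySem.Int.mod (s.toList.length : Int) 2 = ((s.toList.length % 2 : Nat) : Int) from
        PySem.Int.mod_natCast s.toList.length 2]
      have h1 : s.toList.length % 2 = 1 := by omega
      rw [h1]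
      decide)]
    rw [pv_fold_split _ (((s.toList.length + 1) / 2 : Nat) : Int)
      (by
        intro acc i c
        have hcond : (2 * i ≤ (s.toList.length : Int))
            ↔ (i < (((s.toList.length + 1) / 2 : Nat) : Int)) := by omega
        simp only [hcond]) s.toList 0 "" ""]
    simp
    constructor <;> congr 2
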